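-- pv_equiv track=rewrite | github.com/bmmtstb/adventofcode | 2020/Day09.py | sum_of_different_n
-- ===== SOURCE A (Python) =====
-- from typing import List, Set
--
-- def sum_of_different_n(data: List[int], n=2) -> Set[int]:
--     """for every point in the data, calculate the sum of n different numbers"""
--     if n == 1:
--         return set(data)
--     sums = []
--     for i in range(len(data)):
--         for j in sum_of_different_n(data[:i] + data[i + 1:], n - 1):
--             sums.append(int(data[i] + j))
--     return set(sums)
-- ===== SOURCE B (Python) =====
-- def sum_of_different_n(data, n=2):
--     """for every point in the data, calculate the sum of n different numbers"""
--     if n < 1 or n > len(data):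
--         # fewer than one addend, or more addends than there are elements: nothing is reachable
--         return set()
--     # breadth-first level expansion: states of (partial sum, remaining elements)
--     states = [(0, data)]
--     for _ in range(n):
--         states = [(int(s + rest[i]), rest[:i] + rest[i + 1:])
--                   for s, rest in states for i in range(len(rest))]
--     return set(s for s, _ in states)
-- ===== Notes on version B (the rewrite author's own statement) =====
-- stated objective: alternative
-- what changed: Replaces the recursive remove-one-index construction (a Python set built at every recursion node) with an iterative breadth-first level expansion of (partial sum, remaining elements) states, a guard for the unreachable cases n < 1 and n > len(data), and a single final dedup.
import Mathlib
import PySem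

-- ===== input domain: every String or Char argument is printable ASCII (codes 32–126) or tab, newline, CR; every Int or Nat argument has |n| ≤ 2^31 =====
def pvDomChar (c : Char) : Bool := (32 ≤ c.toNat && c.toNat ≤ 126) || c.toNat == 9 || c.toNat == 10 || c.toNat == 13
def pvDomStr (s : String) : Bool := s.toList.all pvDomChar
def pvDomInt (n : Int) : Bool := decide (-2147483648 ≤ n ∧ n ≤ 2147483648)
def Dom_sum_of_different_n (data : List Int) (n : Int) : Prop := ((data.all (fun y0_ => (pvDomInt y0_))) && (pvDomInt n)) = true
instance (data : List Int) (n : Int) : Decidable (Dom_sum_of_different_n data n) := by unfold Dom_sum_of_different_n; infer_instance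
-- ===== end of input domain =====

-- B replaces A's recursive remove-one-index construction (a set built at every recursion node)
-- by an iterative breadth-first expansion of (partial sum, remaining elements) states with one
-- final dedup; a genuinely different decomposition of the same cost (objective: alternative).

-- ===== PORT A =====
def sum_of_different_n (data : List Int) (n : Int) : List Int :=
  if n = 1 then PySem.Set.ofList data
  else
    PySem.Set.ofList <|
      (List.range data.length).attach.foldl
        (fun sums i =>
          sums ++ (sum_of_different_n
              (PySem.List.slice data none (some (i.1 : Int)) ++
               PySem.List.slice data (some ((i.1 : Int) + 1)) none) (n - 1)).map
            (fun j => PySem.List.pyGetD data (i.1 : Int) 0 + j))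
        []
termination_by data.length
decreasing_by
  have hi : i.1 < data.length := List.mem_range.mp i.2
  have h1 : ((i.1 : Int) + 1) = ((i.1 + 1 : Nat) : Int) := by push_cast; ring
  rw [PySem.List.slice_to_natCast, h1, PySem.List.slice_from_natCast]
  simp only [List.length_append, List.length_take, List.length_drop]
  omega

-- ===== PORT B =====
-- one level of B's comprehension: every state spawns one successor per remaining element
def pvExpand (sts : List (Int × List Int)) : List (Int × List Int) :=
  sts.flatMap (fun p =>
    (List.range p.2.length).map (fun (i : Nat) =>
      (p.1 + PySem.List.pyGetD p.2 (i : Int) 0,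
       PySem.List.slice p.2 none (some (i : Int)) ++
       PySem.List.slice p.2 (some ((i : Int) + 1)) none)))

def sum_of_different_n_alt (data : List Int) (n : Int) : List Int :=
  if n < 1 ∨ n > (data.length : Int) then []
  else
    PySem.Set.ofList
      (((PySem.List.pyRange 0 n 1).foldl (fun sts _ => pvExpand sts) [(0, data)]).map Prod.fst)

-- ===== PRECONDITION & SPEC =====
def Spec_sum_of_different_n (data : List Int) (n : Int) (out : List Int) : Prop := out = sum_of_different_n_alt data n
instance (data : List Int) (n : Int) (out : List Int) : Decidable (Spec_sum_of_different_n data n out) := by unfold Spec_sum_of_different_n; infer_instance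

-- ===== CLAIM (what is proved, stated in full; the proofs are below) =====
def Claim_equal_sum_of_different_n : Prop := ∀ (data : List Int) (n : Int), Dom_sum_of_different_n data n → Spec_sum_of_different_n data n (sum_of_different_n data n)

-- ===== LEMMAS AND PROOFS =====

-- the raw (undeduplicated) enumeration both programs walk: sums `s + <k more distinct elements of rest>`
-- in lexicographic order of the chosen index sequences
def pvF : Int → List Int → Nat → List Int
  | s, _, 0 => [s]
  | s, rest, k+1 =>
    (List.range rest.length).flatMap
      (fun i => pvF (s + rest.getD i 0) (rest.take i ++ rest.drop (i+1)) k)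

theorem pv_slice_erase (l : List Int) (i : Nat) :
    PySem.List.slice l none (some (i : Int)) ++ PySem.List.slice l (some ((i : Int) + 1)) none =
      l.take i ++ l.drop (i + 1) := by
  have h1 : ((i : Int) + 1) = ((i + 1 : Nat) : Int) := by push_cast; ring
  rw [PySem.List.slice_to_natCast, h1, PySem.List.slice_from_natCast]

theorem pv_add_mem (s : List Int) (x : Int) (h : x ∈ s) : PySem.Set.add s x = s := by
  simp [PySem.Set.add, PySem.Set.contains, h]

theorem pv_add_not_mem (s : List Int) (x : Int) (h : x ∉ s) : PySem.Set.add s x = s ++ [x] := by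
  simp [PySem.Set.add, PySem.Set.contains, h]

theorem pv_mem_update (l s : List Int) (a : Int) :
    a ∈ PySem.Set.update s l ↔ a ∈ s ∨ a ∈ l := by
  induction l generalizing s with
  | nil => simp [PySem.Set.update]
  | cons x t ih =>
    have : PySem.Set.update s (x :: t) = PySem.Set.update (PySem.Set.add s x) t := by
      simp [PySem.Set.update]
    rw [this, ih]
    by_cases hx : x ∈ s
    · rw [pv_add_mem s x hx]
      constructor
      · rintro (h | h) <;> simp_all
      · rintro (h | h) <;> simp_all
        rcases h with h | h
        · subst h; exact Or.inl hx
        · exact Or.inr h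
    · rw [pv_add_not_mem s x hx]
      simp [or_assoc]

theorem pv_update_append (s l1 l2 : List Int) :
    PySem.Set.update s (l1 ++ l2) = PySem.Set.update (PySem.Set.update s l1) l2 := by
  simp [PySem.Set.update, List.foldl_append]

theorem pv_update_cons (s : List Int) (x : Int) (t : List Int) :
    PySem.Set.update s (x :: t) = PySem.Set.update (PySem.Set.add s x) t := by
  simp [PySem.Set.update]

-- updating with the f-image of a deduplicated list is updating with the f-image of the raw list
theorem pv_update_map_update (f : Int → Int) :
    ∀ (m t s : List Int),
      PySem.Set.update s ((PySem.Set.update t m).map f) =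
        PySem.Set.update (PySem.Set.update s (t.map f)) (m.map f) := by
  intro m
  induction m with
  | nil => intro t s; simp [PySem.Set.update]
  | cons x r ih =>
    intro t s
    rw [pv_update_cons t x r, ih (PySem.Set.add t x) s]
    rw [List.map_cons, pv_update_cons (PySem.Set.update s (t.map f)) (f x) (r.map f)]
    congr 1
    by_cases hx : x ∈ t
    · rw [pv_add_mem t x hx, pv_add_mem]
      rw [pv_mem_update]
      exact Or.inr (List.mem_map_of_mem hx)
    · rw [pv_add_not_mem t x hx, List.map_append, List.map_singleton, pv_update_append]
      have : PySem.Set.update (PySem.Set.update s (t.map f)) [f x] =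
          PySem.Set.add (PySem.Set.update s (t.map f)) (f x) := by
        simp [PySem.Set.update]
      rw [this]

theorem pv_ofList_eq_update (l : List Int) : PySem.Set.ofList l = PySem.Set.update [] l := rfl

theorem pv_update_map_ofList (f : Int → Int) (m s : List Int) :
    PySem.Set.update s ((PySem.Set.ofList m).map f) = PySem.Set.update s (m.map f) := by
  have := pv_update_map_update f m [] s
  simpa [PySem.Set.update] using this

theorem pv_update_flatMap_congr {α : Type} (l : List α) (g h : α → List Int)
    (hgh : ∀ x ∈ l, ∀ s, PySem.Set.update s (g x) = PySem.Set.update s (h x)) :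
    ∀ s, PySem.Set.update s (l.flatMap g) = PySem.Set.update s (l.flatMap h) := by
  induction l with
  | nil => intro s; rfl
  | cons x t ih =>
    intro s
    rw [List.flatMap_cons, List.flatMap_cons, pv_update_append, pv_update_append,
      hgh x (List.mem_cons_self) s]
    exact ih (fun y hy s' => hgh y (List.mem_cons_of_mem x hy) s') _

theorem pvF_shift (c : Int) : ∀ (k : Nat) (s : Int) (rest : List Int),
    (pvF s rest k).map (fun j => c + j) = pvF (c + s) rest k := by
  intro k
  induction k with
  | zero => intro s rest; simp [pvF]
  | succ k ih =>
    intro s rest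
    simp only [pvF, List.map_flatMap]
    simp only [ih, add_assoc]

-- unfolding A once, in flatMap form
theorem pv_A_eq (data : List Int) (n : Int) (hn : n ≠ 1) :
    sum_of_different_n data n =
      PySem.Set.ofList ((List.range data.length).flatMap
        (fun i => (sum_of_different_n (data.take i ++ data.drop (i + 1)) (n - 1)).map
          (fun j => data.getD i 0 + j))) := by
  rw [sum_of_different_n, if_neg hn]
  congr 1
  have hfold : ∀ (g : Nat → List Int) (init : List Int),
      (List.range data.length).attach.foldl (fun sums i => sums ++ g i.1) init =
        init ++ (List.range data.length).flatMap g := by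
    intro g init
    induction (List.range data.length) generalizing init with
    | nil => simp
    | cons a t ih => simp [List.attach_cons, List.foldl_map, ih, List.foldl_cons]
  rw [show (fun sums (i : {x // x ∈ List.range data.length}) =>
      sums ++ (sum_of_different_n
        (PySem.List.slice data none (some (i.1 : Int)) ++
         PySem.List.slice data (some ((i.1 : Int) + 1)) none) (n - 1)).map
        (fun j => PySem.List.pyGetD data (i.1 : Int) 0 + j)) =
      (fun sums (i : {x // x ∈ List.range data.length}) =>
      sums ++ (sum_of_different_n (data.take i.1 ++ data.drop (i.1 + 1)) (n - 1)).map
        (fun j => data.getD i.1 0 + j)) from by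
    funext sums i
    rw [pv_slice_erase, PySem.List.pyGetD_natCast]]
  exact (hfold (fun i => (sum_of_different_n (data.take i ++ data.drop (i + 1)) (n - 1)).map
    (fun j => data.getD i 0 + j)) []).trans (by simp)

theorem pv_A_nonpos : ∀ (len : Nat) (data : List Int), data.length ≤ len →
    ∀ n : Int, n ≤ 0 → sum_of_different_n data n = [] := by
  intro len
  induction len with
  | zero =>
    intro data hlen n hn
    have : data = [] := List.eq_nil_of_length_eq_zero (Nat.le_zero.mp hlen)
    subst this
    rw [pv_A_eq [] n (by omega)]
    simp [PySem.Set.ofList]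
  | succ len ih =>
    intro data hlen n hn
    rw [pv_A_eq data n (by omega)]
    have : (List.range data.length).flatMap
        (fun i => (sum_of_different_n (data.take i ++ data.drop (i + 1)) (n - 1)).map
          (fun j => data.getD i 0 + j)) = [] := by
      apply List.flatMap_eq_nil_iff.mpr
      intro i hi
      have hi' : i < data.length := List.mem_range.mp hi
      have hlen' : (data.take i ++ data.drop (i + 1)).length ≤ len := by
        simp only [List.length_append, List.length_take, List.length_drop]
        omega
      rw [ih _ hlen' (n - 1) (by omega)]
      rfl
    rw [this]
    rfl

theorem pv_flatMap_single {a b : Type} (l : List a) (f : a -> b) :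
    l.flatMap (fun x => [f x]) = l.map f := by
  induction l <;> simp_all

theorem pv_map_getD (l : List Int) : (List.range l.length).map (fun i => l.getD i 0) = l := by
  apply List.ext_getElem
  · simp
  · intro i h1 h2
    simp [List.getD_eq_getElem?_getD, List.getElem?_eq_getElem h2]

theorem pv_A_pos : ∀ (k : Nat) (data : List Int),
    sum_of_different_n data ((k : Int) + 1) = PySem.Set.ofList (pvF 0 data (k + 1)) := by
  intro k
  induction k with
  | zero =>
    intro data
    rw [show ((0 : Nat) : Int) + 1 = 1 from by norm_num, sum_of_different_n, if_pos rfl]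
    congr 1
    simp only [pvF, pv_flatMap_single]
    simpa using (pv_map_getD data).symm
  | succ k ih =>
    intro data
    have hne : ((k : Int) + 1) + 1 ≠ 1 := by omega
    rw [show (((k + 1 : Nat) : Int) + 1) = ((k : Int) + 1) + 1 from by push_cast; ring,
      pv_A_eq data _ hne, show ((k : Int) + 1 + 1 - 1) = ((k : Int) + 1) from by ring,
      pv_ofList_eq_update, pv_ofList_eq_update]
    rw [show pvF 0 data (k + 1 + 1) = (List.range data.length).flatMap
        (fun i => pvF (0 + data.getD i 0) (data.take i ++ data.drop (i + 1)) (k + 1)) from rfl]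
    apply pv_update_flatMap_congr
    intro i _ s
    rw [ih (data.take i ++ data.drop (i + 1)), pv_update_map_ofList,
      pvF_shift (data.getD i 0) (k + 1) 0 (data.take i ++ data.drop (i + 1)),
      show (data.getD i 0 + 0) = (0 + data.getD i 0) from by ring]

theorem pv_foldl_const {α : Type} (f : α → α) :
    ∀ (m : Nat) (a : α), (List.range m).foldl (fun x _ => f x) a = f^[m] a := by
  intro m
  induction m with
  | zero => intro a; rfl
  | succ m ih =>
    intro a
    rw [List.range_succ, List.foldl_append, ih, Function.iterate_succ_apply']
    rfl

theorem pv_iter : ∀ (k : Nat) (sts : List (Int × List Int)),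
    (pvExpand^[k] sts).map Prod.fst = sts.flatMap (fun p => pvF p.1 p.2 k) := by
  intro k
  induction k with
  | zero =>
    intro sts
    simp only [Function.iterate_zero, id_eq, pvF]
    exact (pv_flatMap_single sts Prod.fst).symm
  | succ k ih =>
    intro sts
    rw [Function.iterate_succ_apply, ih (pvExpand sts)]
    unfold pvExpand
    rw [List.flatMap_assoc]
    congr 1
    funext p
    rw [List.flatMap_map]
    rw [show (fun a : Nat => pvF (p.1 + PySem.List.pyGetD p.2 (a : Int) 0)
        (PySem.List.slice p.2 none (some (a : Int)) ++
         PySem.List.slice p.2 (some ((a : Int) + 1)) none) k) =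
      (fun a : Nat => pvF (p.1 + p.2.getD a 0) (p.2.take a ++ p.2.drop (a + 1)) k) from by
        funext a
        rw [pv_slice_erase, PySem.List.pyGetD_natCast]]
    rfl

theorem pvF_nil : ∀ (k : Nat) (s : Int) (rest : List Int),
    rest.length < k → pvF s rest k = [] := by
  intro k
  induction k with
  | zero => intro s rest h; exact absurd h (Nat.not_lt_zero _)
  | succ k ih =>
    intro s rest h
    simp only [pvF]
    apply List.flatMap_eq_nil_iff.mpr
    intro i hi
    have hi' : i < rest.length := List.mem_range.mp hi
    apply ih
    simp only [List.length_append, List.length_take, List.length_drop]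
    omega

theorem pv_B_pos (data : List Int) (n : Int) (hn : 1 ≤ n) (hle : n ≤ (data.length : Int)) :
    sum_of_different_n_alt data n = PySem.Set.ofList (pvF 0 data n.toNat) := by
  rw [sum_of_different_n_alt, if_neg (by omega)]
  congr 1
  have hcast : n = ((n.toNat : Nat) : Int) := by omega
  rw [hcast, PySem.List.pyRange_zero_natCast, List.foldl_map, pv_foldl_const, pv_iter]
  simp only [List.flatMap_cons, List.flatMap_nil, List.append_nil]
  congr 1

-- ===== VERDICT (by name: the statement is the Claim_ definition above) =====
theorem sum_of_different_n_spec : Claim_equal_sum_of_different_n := by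
  intro data n _
  unfold Spec_sum_of_different_n
  by_cases h : n < 1
  · rw [pv_A_nonpos data.length data le_rfl n (by omega)]
    rw [sum_of_different_n_alt, if_pos (Or.inl h)]
  · have h1 : 1 ≤ n := by omega
    obtain ⟨k, hk⟩ : ∃ k : Nat, n = (k : Int) + 1 := ⟨n.toNat - 1, by omega⟩
    by_cases hbig : n > (data.length : Int)
    · rw [sum_of_different_n_alt, if_pos (Or.inr hbig), hk, pv_A_pos k data,
        pvF_nil (k + 1) 0 data (by omega)]
      rfl
    · have ht : ((k : Int) + 1).toNat = k + 1 := by omega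
      rw [hk, pv_B_pos data _ (by omega) (by omega), ht, pv_A_pos k data]
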